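-- pv_equiv track=rewrite | github.com/jghiglia2380/pfl-slide-decks-updated | enrich_slides.py | create_speaker_notes_challenge
-- ===== SOURCE A (Python) =====
-- def create_speaker_notes_challenge(prompts):
--     """Create speaker notes for slide 2 from challenge prompts."""
--     if not prompts:
--         return ""
--
--     # Format the prompts into a coherent speaker note
--     notes_parts = []
--
--     for prompt in prompts:
--         if 'read' in prompt.lower() or 'scenario' in prompt.lower():
--             notes_parts.insert(0, prompt)  # Put reading instruction first
--         else:
--             notes_parts.append(prompt)
--
--     return ' '.join(notes_parts)
-- ===== SOURCE B (Python) =====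
-- def create_speaker_notes_challenge(prompts):
--     """Create speaker notes for slide 2 from challenge prompts."""
--     reading = []
--     other = []
--     for prompt in prompts:
--         low = prompt.lower()
--         if 'read' in low or 'scenario' in low:
--             reading.append(prompt)
--         else:
--             other.append(prompt)
--     return ' '.join(reading[::-1] + other)
-- ===== Notes on version B (the rewrite author's own statement) =====
-- stated objective: simpler
-- what changed: Replaces the quadratic insert(0,...) front-insertion loop with a single partition into two appended lists, joining the reversed reading list before the others; the empty-list guard disappears since joining nothing gives "".
import Mathlib
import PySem

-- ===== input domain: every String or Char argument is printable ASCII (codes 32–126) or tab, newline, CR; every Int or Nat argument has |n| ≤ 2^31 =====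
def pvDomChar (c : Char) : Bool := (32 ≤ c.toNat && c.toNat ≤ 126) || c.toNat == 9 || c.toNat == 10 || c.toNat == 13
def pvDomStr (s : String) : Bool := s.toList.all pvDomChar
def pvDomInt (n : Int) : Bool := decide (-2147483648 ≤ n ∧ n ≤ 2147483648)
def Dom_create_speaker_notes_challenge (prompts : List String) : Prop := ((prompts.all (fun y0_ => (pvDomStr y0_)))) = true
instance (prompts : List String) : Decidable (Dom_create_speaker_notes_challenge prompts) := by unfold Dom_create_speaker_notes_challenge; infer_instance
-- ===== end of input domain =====

-- B replaces A's quadratic insert(0, ...) loop by a one-pass partition into two lists,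
-- joining reversed reading prompts before the others; return value equivalence only.
-- ===== PORT A =====
-- 'read' in prompt.lower() or 'scenario' in prompt.lower()
def pvIsReading (prompt : String) : Bool :=
  PySem.Str.isIn "read" (PySem.Str.lower prompt) || PySem.Str.isIn "scenario" (PySem.Str.lower prompt)

def create_speaker_notes_challenge (prompts : List String) : String :=
  if prompts = [] then ""
  else
    let notes_parts := prompts.foldl
      (fun acc prompt => if pvIsReading prompt then prompt :: acc else acc ++ [prompt]) []
    PySem.Str.join " " notes_parts

-- ===== PORT B =====
def create_speaker_notes_challenge_alt (prompts : List String) : String :=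
  let st := prompts.foldl
    (fun (st : List String × List String) prompt =>
      if pvIsReading prompt then (st.1 ++ [prompt], st.2) else (st.1, st.2 ++ [prompt]))
    ([], [])
  PySem.Str.join " " (st.1.reverse ++ st.2)

-- ===== PRECONDITION & SPEC =====
def Spec_create_speaker_notes_challenge (prompts : List String) (out : String) : Prop := out = create_speaker_notes_challenge_alt prompts
instance (prompts : List String) (out : String) : Decidable (Spec_create_speaker_notes_challenge prompts out) := by unfold Spec_create_speaker_notes_challenge; infer_instance

-- ===== CLAIM (what is proved, stated in full; the proofs are below) =====
def Claim_equal_create_speaker_notes_challenge : Prop := ∀ (prompts : List String), Dom_create_speaker_notes_challenge prompts → Spec_create_speaker_notes_challenge prompts (create_speaker_notes_challenge prompts)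

-- ===== LEMMAS AND PROOFS =====
-- A's accumulator equals B's (reversed reading ++ other) throughout the loop.
lemma pv_loop (prompts : List String) : ∀ (r o : List String),
    prompts.foldl
      (fun acc prompt => if pvIsReading prompt then prompt :: acc else acc ++ [prompt])
      (r.reverse ++ o)
    = (prompts.foldl
        (fun (st : List String × List String) prompt =>
          if pvIsReading prompt then (st.1 ++ [prompt], st.2) else (st.1, st.2 ++ [prompt]))
        (r, o)).1.reverse ++
      (prompts.foldl
        (fun (st : List String × List String) prompt =>
          if pvIsReading prompt then (st.1 ++ [prompt], st.2) else (st.1, st.2 ++ [prompt]))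
        (r, o)).2 := by
  induction prompts with
  | nil => intro r o; simp
  | cons p ps ih =>
    intro r o
    by_cases h : pvIsReading p
    · simpa [h] using ih (r ++ [p]) o
    · simpa [h, List.append_assoc] using ih r (o ++ [p])

-- ===== VERDICT (by name: the statement is the Claim_ definition above) =====
theorem create_speaker_notes_challenge_spec : Claim_equal_create_speaker_notes_challenge := by
  intro prompts _
  unfold Spec_create_speaker_notes_challenge
  unfold create_speaker_notes_challenge create_speaker_notes_challenge_alt
  by_cases hp : prompts = []
  · subst hp; simp; decide
  · simpa [hp] using congrArg (PySem.Str.join " ") (pv_loop prompts [] [])
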